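-- pv_equiv track=rewrite | github.com/kyogre235/Complejidad-Practica-01 | euleriano.py | max_grado_vertice
-- ===== SOURCE A (Python) =====
-- def max_grado_vertice(matriz):
--     """
--     Encuentra el vértice con el mayor grado en la gráfica.
--
--     Parámetros:
--     -----------
--     matriz : list[list[int]]
--         Matriz de adyacencia de la gráfica.
--
--     Retorna:
--     --------
--     tuple (int, int)
--         - Vértice con el mayor grado (sumando aristas incidentes).
--         - Valor del grado del vértice.
--     """
--     numV = len(matriz)
--     grados = []
--     for fila in range(numV):
--         aux=0
--         for columna in range(numV):
--             if matriz[fila][columna] == 1: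
--                 aux += 1
--         grados.append(aux)
--
--     grado = max(grados)
--     vertice = grados.index(grado)
--     return vertice+1,grado
-- ===== SOURCE B (Python) =====
-- def max_grado_vertice(matriz):
--     """Single pass: track the best (vertex, degree) while counting each row's 1-entries."""
--     if not matriz:
--         raise ValueError("max() arg is an empty sequence")
--     n = len(matriz)
--     best_v, best_g = 0, -1
--     for i, fila in enumerate(matriz):
--         g = sum(1 if fila[j] == 1 else 0 for j in range(n))
--         if g > best_g:
--             best_v, best_g = i, g
--     return best_v + 1, best_g
-- ===== Notes on version B (the rewrite author's own statement) =====
-- stated objective: simpler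
-- what changed: B replaces A's three phases (build a full degree list, then max(), then list.index()) by one pass that counts each row's 1-entries and keeps a running (best_vertex, best_degree), updating only on strictly greater degree so the first maximum wins.
-- outside the precondition, e.g. on max_grado_vertice([]): A raises ValueError, B raises ValueError; on max_grado_vertice([[1], [1, 1]]): A raises IndexError, B raises IndexError
import Mathlib
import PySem

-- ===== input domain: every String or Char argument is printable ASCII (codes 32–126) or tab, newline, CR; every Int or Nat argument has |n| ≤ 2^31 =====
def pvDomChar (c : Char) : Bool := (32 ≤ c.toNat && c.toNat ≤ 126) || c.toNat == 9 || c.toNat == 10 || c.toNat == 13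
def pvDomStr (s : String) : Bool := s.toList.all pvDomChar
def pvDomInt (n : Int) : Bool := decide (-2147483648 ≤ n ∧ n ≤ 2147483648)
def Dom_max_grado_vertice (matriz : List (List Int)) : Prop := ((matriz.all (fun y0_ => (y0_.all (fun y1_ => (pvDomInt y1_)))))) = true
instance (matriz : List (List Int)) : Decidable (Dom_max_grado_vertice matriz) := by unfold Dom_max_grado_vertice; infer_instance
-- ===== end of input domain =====

-- B does one pass keeping a running best (vertex, degree) instead of A's degree-list + max() + index(); same values.

-- ===== PORT A =====
def max_grado_vertice (matriz : List (List Int)) : Int × Int :=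
  let numV : Int := matriz.length
  let grados : List Int :=
    (PySem.List.pyRange 0 numV 1).foldl
      (fun grados fila =>
        let aux : Int :=
          (PySem.List.pyRange 0 numV 1).foldl
            (fun aux columna =>
              if PySem.List.pyGetD (PySem.List.pyGetD matriz fila []) columna 0 == 1
              then aux + 1 else aux)
            0
        grados ++ [aux])
      []
  match PySem.List.max? grados (fun x => x) with
  | none => (0, 0)        -- Python raises ValueError here (empty matrix); excluded by Pre_
  | some grado =>
    match PySem.List.index? grados grado with
    | none => (0, 0)      -- unreachable: the max is a member of grados
    | some vertice => ((vertice : Int) + 1, grado)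

-- ===== PORT B =====
def max_grado_vertice_alt (matriz : List (List Int)) : Int × Int :=
  let n : Int := matriz.length
  let best :=
    (PySem.List.enumerate matriz 0).foldl
      (fun (best : Int × Int) p =>
        let g : Int := ((PySem.List.pyRange 0 n 1).map
          (fun j => if PySem.List.pyGetD p.2 j 0 == 1 then (1 : Int) else 0)).sum
        if g > best.2 then (p.1, g) else best)
      (0, -1)
  (best.1 + 1, best.2)

-- ===== PRECONDITION & SPEC =====
-- Pre_ excludes exactly the inputs where A raises: the empty matrix (ValueError from max([]))
-- and matrices with a row shorter than len(matriz) (IndexError in the inner loop).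
def Pre_max_grado_vertice (matriz : List (List Int)) : Prop :=
  matriz ≠ [] ∧ ∀ fila ∈ matriz, matriz.length ≤ fila.length
instance (matriz : List (List Int)) : Decidable (Pre_max_grado_vertice matriz) := by
  unfold Pre_max_grado_vertice; infer_instance
def pvWitness_max_grado_vertice : List (List Int) := [[0, 1], [1, 0]]

def Spec_max_grado_vertice (matriz : List (List Int)) (out : Int × Int) : Prop := out = max_grado_vertice_alt matriz
instance (matriz : List (List Int)) (out : Int × Int) : Decidable (Spec_max_grado_vertice matriz out) := by unfold Spec_max_grado_vertice; infer_instance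

-- ===== CLAIM (what is proved, stated in full; the proofs are below) =====
def Claim_equal_max_grado_vertice : Prop := ∀ (matriz : List (List Int)), Dom_max_grado_vertice matriz → Pre_max_grado_vertice matriz → Spec_max_grado_vertice matriz (max_grado_vertice matriz)

-- ===== LEMMAS AND PROOFS =====

-- first-occurrence index of a member, as index?
lemma idxOf?_of_mem (l : List Int) (v : Int) (h : v ∈ l) :
    PySem.List.index? l v = some (List.idxOf v l) := by
  rw [PySem.List.index?_eq_idxOf?]
  induction l with
  | nil => simp at h
  | cons x t ih =>
    by_cases hx : x = v
    · simp [List.idxOf?_cons, hx]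
    · have hvt : v ∈ t := by
        rcases (List.mem_cons.mp h) with h1 | h1
        · exact absurd h1.symm hx
        · exact h1
      simp [List.idxOf?_cons, hx, ih hvt]

lemma map_getD_range_eq_take (l : List Int) (n : Nat) (h : n ≤ l.length) :
    (List.range n).map (fun j => l.getD j 0) = l.take n := by
  apply List.ext_getElem
  · simpa using h
  · intro i h1 h2
    simp at h1 ⊢
    simp [List.getElem?_eq_getElem (by omega : i < l.length)]

-- counting 1s by index over range(n) is counting 1s in the first n entries of fila
lemma countP_range (fila : List Int) (n : Nat) (h : n ≤ fila.length) :
    List.countP (fun columna => PySem.List.pyGetD fila columna 0 == 1) (PySem.List.pyRange 0 (n : Int))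
    = (fila.take n).count 1 := by
  rw [PySem.List.pyRange_zero_natCast, List.countP_map]
  have : (List.countP ((fun columna => PySem.List.pyGetD fila columna 0 == 1) ∘ fun k : Nat => (k : Int)) (List.range n))
      = ((List.range n).map (fun j => fila.getD j 0)).count 1 := by
    simp [List.count, List.countP_map]
    congr 1
    funext j
    simp [PySem.List.pyGetD_natCast]
  rw [this, map_getD_range_eq_take fila n h]

-- A's inner counting loop computes the number of 1s among the first n entries of fila.
lemma inner_count (fila : List Int) (n : Nat) (h : n ≤ fila.length) :
    (PySem.List.pyRange 0 (n : Int) 1).foldl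
      (fun aux columna => if PySem.List.pyGetD fila columna 0 == 1 then aux + 1 else aux) (0 : Int)
    = ((fila.take n).count 1 : Nat) := by
  rw [PySem.List.foldl_count_if, countP_range fila n h]
  simp

-- running best over an enumerated nonempty list = (first index of the max, the max)
lemma best_fold (t : List Int) : ∀ (g j bv bg : Int),
    (PySem.List.enumerate (g :: t) j).foldl
      (fun (best : Int × Int) p => if p.2 > best.2 then (p.1, p.2) else best) (bv, bg)
    = (if t.foldl max g > bg then (j + (List.idxOf (t.foldl max g) (g :: t) : Int), t.foldl max g) else (bv, bg)) := by
  induction t with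
  | nil =>
    intro g j bv bg
    simp only [PySem.List.enumerate, List.foldl_cons, List.foldl_nil]
    by_cases hg : g > bg
    · rw [if_pos hg, if_pos hg, List.idxOf_cons_self]
      simp
    · rw [if_neg hg, if_neg hg]
  | cons x t' ih =>
    intro g j bv bg
    have hm : (x :: t').foldl max g = max g (t'.foldl max x) := by
      rw [List.foldl_cons, List.foldl_assoc]
    rw [PySem.List.enumerate_cons, List.foldl_cons, hm]
    by_cases hg : g > bg
    · rw [if_pos hg, ih x (j + 1) j g]
      by_cases hx : t'.foldl max x > g
      · have hgm : g ≠ t'.foldl max x := ne_of_lt hx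
        rw [if_pos hx, max_eq_right (le_of_lt hx), if_pos (lt_trans hg hx),
          List.idxOf_cons_ne _ hgm]
        simp only [Prod.mk.injEq, Nat.succ_eq_add_one]
        refine ⟨by push_cast; ring, trivial⟩
      · rw [if_neg hx, max_eq_left (not_lt.mp hx), if_pos hg, List.idxOf_cons_self]
        simp
    · rw [if_neg hg, ih x (j + 1) bv bg]
      by_cases hx : t'.foldl max x > bg
      · have hgm : g ≠ t'.foldl max x := ne_of_lt (lt_of_le_of_lt (not_lt.mp hg) hx)
        rw [if_pos hx, max_eq_right (le_of_lt (lt_of_le_of_lt (not_lt.mp hg) hx)), if_pos hx,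
          List.idxOf_cons_ne _ hgm]
        simp only [Prod.mk.injEq, Nat.succ_eq_add_one]
        refine ⟨by push_cast; ring, trivial⟩
      · rw [if_neg hx, if_neg (not_lt.mpr (max_le (not_lt.mp hg) (not_lt.mp hx)))]

-- enumerate-fold over rows with a degree function = enumerate-fold over the degree list
lemma enum_map_fold (deg : List Int → Int) (xs : List (List Int)) : ∀ (j : Int) (acc : Int × Int),
    (PySem.List.enumerate xs j).foldl
      (fun (best : Int × Int) p => if deg p.2 > best.2 then (p.1, deg p.2) else best) acc
    = (PySem.List.enumerate (xs.map deg) j).foldl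
      (fun (best : Int × Int) p => if p.2 > best.2 then (p.1, p.2) else best) acc := by
  induction xs with
  | nil => intro j acc; simp [PySem.List.enumerate]
  | cons x t ih =>
    intro j acc
    rw [List.map_cons, PySem.List.enumerate_cons, PySem.List.enumerate_cons,
      List.foldl_cons, List.foldl_cons, ih]

-- A's degree list is the per-row count of 1s among the first n entries
lemma grados_eq (matriz : List (List Int)) (hrows : ∀ fila ∈ matriz, matriz.length ≤ fila.length) :
    (PySem.List.pyRange 0 (matriz.length : Int) 1).foldl
      (fun grados fila =>
        grados ++ [(PySem.List.pyRange 0 (matriz.length : Int) 1).foldl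
          (fun aux columna =>
            if PySem.List.pyGetD (PySem.List.pyGetD matriz fila []) columna 0 == 1
            then aux + 1 else aux) 0])
      []
    = matriz.map (fun fila => (((fila.take matriz.length).count 1 : Nat) : Int)) := by
  rw [PySem.List.foldl_append_singleton_eq_map]
  have hlen : (matriz.length : Int) = PySem.List.len matriz := by simp [PySem.List.len]
  have hmm : (PySem.List.pyRange 0 (matriz.length : Int) 1).map
        (fun fila => (PySem.List.pyRange 0 (matriz.length : Int) 1).foldl
          (fun aux columna =>
            if PySem.List.pyGetD (PySem.List.pyGetD matriz fila []) columna 0 == 1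
            then aux + 1 else aux) 0)
      = ((PySem.List.pyRange 0 (matriz.length : Int) 1).map
          (fun j => PySem.List.pyGetD matriz j [])).map
          (fun fila => (PySem.List.pyRange 0 (matriz.length : Int) 1).foldl
            (fun aux columna =>
              if PySem.List.pyGetD fila columna 0 == 1 then aux + 1 else aux) (0 : Int)) := by
    rw [List.map_map]
    rfl
  rw [List.nil_append]
  refine hmm.trans ?_
  have hget : (PySem.List.pyRange 0 ((matriz.length : Int))).map (fun j => PySem.List.pyGetD matriz j []) = matriz := by
    rw [hlen]; exact PySem.List.map_pyGetD_pyRange_zero matriz []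
  rw [hget]
  refine List.map_congr_left ?_
  intro fila hf
  exact inner_count fila matriz.length (hrows fila hf)

-- ===== VERDICT (by name: the statement is the Claim_ definition above) =====
theorem max_grado_vertice_spec : Claim_equal_max_grado_vertice := by
  intro matriz _ hpre
  obtain ⟨hne, hrows⟩ := hpre
  unfold Spec_max_grado_vertice max_grado_vertice max_grado_vertice_alt
  simp only []
  rw [grados_eq matriz hrows]
  obtain ⟨hd, tl, rfl⟩ : ∃ h t, matriz = h :: t := by
    cases matriz with
    | nil => exact absurd rfl hne
    | cons h t => exact ⟨h, t, rfl⟩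
  set n := (hd :: tl).length with hn
  set deg : List Int → Int := fun fila => (((fila.take n).count 1 : Nat) : Int) with hdeg
  -- B side: replace the per-row 0/1-sum by deg, then move to the degree list
  have hstep : (PySem.List.enumerate (hd :: tl) 0).foldl
        (fun (best : Int × Int) p =>
          if ((PySem.List.pyRange 0 (n : Int) 1).map
              (fun j => if PySem.List.pyGetD p.2 j 0 == 1 then (1 : Int) else 0)).sum > best.2
          then (p.1, ((PySem.List.pyRange 0 (n : Int) 1).map
              (fun j => if PySem.List.pyGetD p.2 j 0 == 1 then (1 : Int) else 0)).sum)
          else best) (0, -1)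
      = (PySem.List.enumerate (hd :: tl) 0).foldl
        (fun (best : Int × Int) p => if deg p.2 > best.2 then (p.1, deg p.2) else best) (0, -1) := by
    refine PySem.List.foldl_congr_mem _ _ _ _ ?_
    intro acc x hx
    obtain ⟨k, hk, rfl⟩ := (PySem.List.mem_enumerate_iff (hd :: tl) 0 x).mp hx
    have hrow : n ≤ ((hd :: tl)[k]).length := hrows _ (List.getElem_mem hk)
    have hg : ((PySem.List.pyRange 0 (n : Int) 1).map
        (fun j => if PySem.List.pyGetD ((hd :: tl)[k]) j 0 == 1 then (1 : Int) else 0)).sum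
        = deg ((hd :: tl)[k]) := by
      rw [PySem.List.sum_map_ite_one_zero, countP_range _ n hrow, hdeg]
    simp only [hg]
  rw [hstep, enum_map_fold deg (hd :: tl) 0 (0, -1), List.map_cons,
    best_fold (tl.map deg) (deg hd) 0 0 (-1)]
  -- A side: max? and index? of the degree list
  set m : Int := (tl.map deg).foldl max (deg hd) with hm
  have hmax : PySem.List.max? (deg hd :: tl.map deg) (fun y => y) = some m :=
    PySem.List.max?_id_cons (deg hd) (tl.map deg)
  have hmem : m ∈ deg hd :: tl.map deg := PySem.List.max?_mem hmax
  rw [hmax]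
  dsimp only
  rw [idxOf?_of_mem _ m hmem]
  dsimp only
  have hpos : m > -1 := by
    have h1 : deg hd ≤ m := (PySem.List.le_foldl_max (tl.map deg) (deg hd)).1
    have h2 : (0 : Int) ≤ deg hd := by simp [hdeg]
    omega
  rw [if_pos hpos]
  simp
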